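-- pv_equiv track=rewrite | github.com/7pairs/pyslash | pyslash/crawler/baseball.py | create_score_line
-- ===== SOURCE A (Python) =====
-- def create_score_line(scores):
--     """
--     スコア行(先攻のみ、もしくは後攻のみ)を構築する。
--
--     :param scores: 各イニングのスコア
--     :type scores: Iterable[int]
--     :return: スコア行
--     :rtype: str
--     """
--     # 各イニングのスコアを連結する
--     ret_val = ''
--     for i, score in enumerate(scores):
--         if i != 0:
--             # 3イニングごとに広めに区切る
--             if i % 3 == 0:
--                 ret_val += '  '
--             else:
--                 ret_val += ' '
--         ret_val += score
--
--     # 構築したスコア行を返す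
--     return ret_val
-- ===== SOURCE B (Python) =====
-- def create_score_line(scores):
--     """
--     スコア行(先攻のみ、もしくは後攻のみ)を構築する。
--
--     :param scores: 各イニングのスコア
--     :type scores: Iterable[int]
--     :return: スコア行
--     :rtype: str
--     """
--     scores = list(scores)
--     groups = [scores[i:i + 3] for i in range(0, len(scores), 3)]
--     return '  '.join(' '.join(group) for group in groups)
-- ===== Notes on version B (the rewrite author's own statement) =====
-- stated objective: simpler
-- what changed: Replaces the single accumulating loop with a per-index separator test (i!=0, i%3==0) by an explicit two-level grouping: chunk the scores into consecutive groups of 3, join each group with ' ', and join the groups with ' '.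
import Mathlib
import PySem

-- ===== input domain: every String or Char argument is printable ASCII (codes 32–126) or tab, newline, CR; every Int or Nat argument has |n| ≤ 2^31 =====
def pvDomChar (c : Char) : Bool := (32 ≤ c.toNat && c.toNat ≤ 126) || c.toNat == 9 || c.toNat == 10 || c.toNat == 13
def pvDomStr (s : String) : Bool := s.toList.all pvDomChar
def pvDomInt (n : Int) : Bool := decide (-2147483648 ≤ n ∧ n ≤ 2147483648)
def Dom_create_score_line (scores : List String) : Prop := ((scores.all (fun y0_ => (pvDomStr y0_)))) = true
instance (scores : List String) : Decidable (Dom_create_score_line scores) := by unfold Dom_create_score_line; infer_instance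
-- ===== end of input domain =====

-- B replaces A's per-index separator test inside one accumulating loop by an explicit
-- two-level grouping (chunks of 3, joined with ' ', groups joined with '  '); objective: simpler.


-- ===== PORT A =====
def create_score_line (scores : List String) : String :=
  (PySem.List.enumerate scores).foldl
    (fun ret_val p =>
      let ret_val := if p.1 ≠ 0 then
          (if PySem.Int.mod p.1 3 == 0 then ret_val ++ "  " else ret_val ++ " ")
        else ret_val
      ret_val ++ p.2) ""

-- ===== PORT B =====
def create_score_line_alt (scores : List String) : String :=
  let groups := (PySem.List.pyRange 0 (scores.length : Int) 3).map
      (fun i => PySem.List.slice scores (some i) (some (i + 3)))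
  PySem.Str.join "  " (groups.map (fun group => PySem.Str.join " " group))

-- ===== PRECONDITION & SPEC =====
def Spec_create_score_line (scores : List String) (out : String) : Prop := out = create_score_line_alt scores
instance (scores : List String) (out : String) : Decidable (Spec_create_score_line scores out) := by unfold Spec_create_score_line; infer_instance

-- ===== CLAIM (what is proved, stated in full; the proofs are below) =====
def Claim_equal_create_score_line : Prop := ∀ (scores : List String), Dom_create_score_line scores → Spec_create_score_line scores (create_score_line scores)

-- ===== LEMMAS AND PROOFS =====

-- the chunks B's comprehension produces, as a recursive grouping (proof helper)
def pvChunks3 : List String → List (List String)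
  | [] => []
  | x :: rest => (x :: rest.take 2) :: pvChunks3 (rest.drop 2)
termination_by l => l.length
decreasing_by simp

theorem pv_take_drop_eq : ∀ (xs : List String),
    (List.range ((xs.length + 2) / 3)).map (fun k => (xs.drop (3 * k)).take 3) = pvChunks3 xs
  | [] => by rw [pvChunks3]; simp
  | x :: rest => by
    rw [pvChunks3]
    have ih := pv_take_drop_eq (rest.drop 2)
    simp only [List.length_drop] at ih
    have hM : ((x :: rest).length + 2) / 3 = (rest.length - 2 + 2) / 3 + 1 := by
      simp only [List.length_cons]; omega
    rw [hM, List.range_succ_eq_map, List.map_cons, List.map_map]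
    congr 1
    rw [← ih]
    apply List.map_congr_left
    intro k _
    have hdrop : List.drop (3 * (k + 1)) (x :: rest) = List.drop (3 * k) (List.drop 2 rest) := by
      rw [List.drop_drop]
      rw [show 3 * (k + 1) = (3 * k + 2) + 1 from by omega, List.drop_succ_cons]
      congr 1
      omega
    simp only [Function.comp]
    rw [show Nat.succ k = k + 1 from rfl, hdrop]
termination_by xs => xs.length
decreasing_by simp only [List.length_drop, List.length_cons]; omega

theorem pv_groups_eq (xs : List String) :
    (PySem.List.pyRange 0 (xs.length : Int) 3).map
      (fun i => PySem.List.slice xs (some i) (some (i + 3))) = pvChunks3 xs := by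
  rw [PySem.List.pyRange_of_pos 0 (xs.length : Int) (by norm_num), List.map_map]
  have hM : (if (0:Int) < (xs.length : Int) then (((xs.length : Int) - 0 + 3 - 1) / 3).toNat else 0)
      = (xs.length + 2) / 3 := by split <;> omega
  rw [hM, ← pv_take_drop_eq xs]
  apply List.map_congr_left
  intro k _
  have h := PySem.List.slice_natCast_add xs (3 * k) 3
  simp only [Function.comp]
  convert h using 3 <;> push_cast <;> ring

-- A's separator pattern for a suffix whose first element has index k ≥ 1, as a list of chars
def pvG : Int → List String → List Char
  | _, [] => []
  | k, x :: rest => (if k % 3 = 0 then [' ', ' '] else [' ']) ++ x.toList ++ pvG (k + 1) rest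

-- B's result on chunks, at the char level
def pvH (gs : List (List String)) : List Char :=
  PySem.Chars.join [' ', ' '] (gs.map (fun g => PySem.Chars.join [' '] (g.map String.toList)))

theorem pvG_shift : ∀ (xs : List String) (k k' : Int), k % 3 = k' % 3 → pvG k xs = pvG k' xs := by
  intro xs
  induction xs with
  | nil => intro k k' _; rfl
  | cons x rest ih =>
    intro k k' h
    simp only [pvG, h, ih (k + 1) (k' + 1) (by omega)]

theorem pv_fold_G (xs : List String) : ∀ (s : String) (k : Int), 1 ≤ k →
    ((PySem.List.enumerate xs k).foldl
      (fun ret_val p =>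
        (if p.1 ≠ 0 then
            (if PySem.Int.mod p.1 3 == 0 then ret_val ++ "  " else ret_val ++ " ")
          else ret_val) ++ p.2) s).toList = s.toList ++ pvG k xs := by
  induction xs with
  | nil => intro s k _; simp [PySem.List.enumerate_nil, pvG]
  | cons x rest ih =>
    intro s k hk
    rw [PySem.List.enumerate_cons, List.foldl_cons]
    simp only
    rw [if_pos (by omega : k ≠ 0)]
    rw [PySem.Int.mod_eq_emod_of_pos (by norm_num : (0:Int) < 3)]
    by_cases h3 : k % 3 = 0
    · rw [if_pos (by simpa using h3), ih _ (k + 1) (by omega)]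
      simp [pvG, h3]
    · rw [if_neg (by simpa using h3), ih _ (k + 1) (by omega)]
      simp [pvG, h3]

theorem pvChunks3_cons_ne_nil (x : String) (rest : List String) : pvChunks3 (x :: rest) ≠ [] := by
  rw [pvChunks3]; simp

-- head a, then the rest with indices from 1, equals B's chunked join
theorem pv_key : ∀ (rest : List String) (a : String),
    a.toList ++ pvG 1 rest = pvH (pvChunks3 (a :: rest))
  | [], a => by
    rw [pvChunks3]
    simp [pvG, pvChunks3, pvH, PySem.Chars.join_singleton]
  | [b], a => by
    rw [pvChunks3]
    simp [pvG, pvChunks3, pvH, PySem.Chars.join_singleton]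
    rw [PySem.Chars.join_cons_cons, PySem.Chars.join_singleton]
    norm_num [pvG]
  | b :: c :: rest', a => by
    have hG : pvG 1 (b :: c :: rest') =
        [' '] ++ b.toList ++ ([' '] ++ c.toList ++ pvG 3 rest') := by
      norm_num [pvG]
    have hsh : pvG 3 rest' = pvG 0 rest' := pvG_shift rest' 3 0 (by norm_num)
    cases rest' with
    | nil =>
      rw [hG, hsh]
      rw [pvChunks3]
      simp [pvG, pvChunks3, pvH, PySem.Chars.join_singleton, PySem.Chars.join_cons_cons]
    | cons d r =>
      have hrec : d.toList ++ pvG 1 r = pvH (pvChunks3 (d :: r)) := pv_key r d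
      rw [hG, hsh]
      have h0 : pvG 0 (d :: r) = [' ', ' '] ++ d.toList ++ pvG 1 r := by norm_num [pvG]
      rw [h0]
      have hchunks : pvChunks3 (a :: b :: c :: d :: r) =
          [a, b, c] :: pvChunks3 (d :: r) := by rw [pvChunks3]; rfl
      rw [hchunks]
      obtain ⟨g, gs, hg⟩ : ∃ g gs, pvChunks3 (d :: r) = g :: gs := by
        cases h : pvChunks3 (d :: r) with
        | nil => exact absurd h (pvChunks3_cons_ne_nil d r)
        | cons g gs => exact ⟨g, gs, rfl⟩
      rw [hg]
      rw [hg] at hrec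
      simp only [pvH, List.map_cons, PySem.Chars.join_cons_cons] at hrec ⊢
      rw [← hrec]
      simp [PySem.Chars.join_singleton]
termination_by rest => rest.length
decreasing_by simp only [List.length_cons]; omega

theorem pvB_toList (scores : List String) :
    (create_score_line_alt scores).toList = pvH (pvChunks3 scores) := by
  unfold create_score_line_alt pvH
  rw [pv_groups_eq scores]
  have h2 : "  ".toList = [' ', ' '] := by decide
  have h1 : " ".toList = [' '] := by decide
  simp only [PySem.Str.toList_join, List.map_map, Function.comp_def, h1, h2]

-- ===== VERDICT (by name: the statement is the Claim_ definition above) =====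
theorem create_score_line_spec : Claim_equal_create_score_line := by
  intro scores _
  unfold Spec_create_score_line
  apply String.toList_inj.mp
  rw [pvB_toList]
  cases scores with
  | nil =>
    rw [pvChunks3]
    simp [create_score_line, PySem.List.enumerate_nil, pvH, PySem.Chars.join_nil]
  | cons a rest =>
    unfold create_score_line
    rw [PySem.List.enumerate_cons, List.foldl_cons]
    simp only [zero_add]
    rw [if_neg (by simp)]
    rw [pv_fold_G rest ("" ++ a) 1 (le_refl 1)]
    rw [← pv_key rest a]
    simp
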